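-- pv_equiv track=rewrite | github.com/PigStep/Restourant-Sentimental-Analys-ML-based | model.py | merge_negative_tokens
-- ===== SOURCE A (Python) =====
-- def merge_negative_tokens(tokens):
--     skip = False
--     negations = {"no", "not", "never", "none", "nobody", "neither", "nor"}
--     merge = []
--     for i in range(len(tokens)):
--         if skip:
--             skip = False
--             continue
--         if tokens[i] in negations and i+1 < len(tokens):
--             skip = True
--             merge.append(f"{tokens[i]}_{tokens[i+1]}")
--             continue
--         merge.append(tokens[i])
--     return merge
-- ===== SOURCE B (Python) =====
-- def merge_negative_tokens(tokens):
--     negations = {"no", "not", "never", "none", "nobody", "neither", "nor"}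
--     _SENTINEL = object()
--     merge = []
--     it = iter(tokens)
--     for tok in it:
--         if tok in negations:
--             nxt = next(it, _SENTINEL)
--             if nxt is _SENTINEL:
--                 merge.append(tok)
--             else:
--                 merge.append(f"{tok}_{nxt}")
--         else:
--             merge.append(tok)
--     return merge
-- ===== Notes on version B (the rewrite author's own statement) =====
-- stated objective: idiomatic
-- what changed: Replaces the index loop with its skip flag and i+1 bounds check by an iterator-consuming loop: a negation word pulls its successor directly from the iterator (with a unique sentinel for exhaustion), so no index arithmetic or flag state remains.
import Mathlib
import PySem

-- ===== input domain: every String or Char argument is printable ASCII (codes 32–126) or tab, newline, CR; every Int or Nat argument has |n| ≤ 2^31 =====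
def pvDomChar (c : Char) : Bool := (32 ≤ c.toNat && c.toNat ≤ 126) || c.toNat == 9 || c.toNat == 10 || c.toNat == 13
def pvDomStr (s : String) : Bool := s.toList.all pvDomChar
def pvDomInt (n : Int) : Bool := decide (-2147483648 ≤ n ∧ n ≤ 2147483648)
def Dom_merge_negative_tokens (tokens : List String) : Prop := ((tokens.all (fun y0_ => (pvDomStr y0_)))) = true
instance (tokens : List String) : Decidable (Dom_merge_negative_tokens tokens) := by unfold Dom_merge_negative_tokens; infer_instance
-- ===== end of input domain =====

-- B replaces A's index loop with skip flag by an iterator-style loop that consumes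
-- the token following a negation directly (idiomatic; same O(n) cost).

-- ===== PORT A =====
-- the set literal {"no", ...}
def pvNegations : PySem.Set String :=
  PySem.Set.ofList ["no", "not", "never", "none", "nobody", "neither", "nor"]

-- the body of A's for-loop, state = (skip, merge)
def pvStepA (tokens : List String) (st : Bool × List String) (i : Int) : Bool × List String :=
  if st.1 then (false, st.2)
  else if PySem.List.pyGetD tokens i "" ∈ pvNegations ∧ i + 1 < (tokens.length : Int) then
    (true, st.2 ++ [PySem.List.pyGetD tokens i "" ++ "_" ++ PySem.List.pyGetD tokens (i + 1) ""])
  else (st.1, st.2 ++ [PySem.List.pyGetD tokens i ""])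

def merge_negative_tokens (tokens : List String) : List String :=
  ((PySem.List.pyRange 0 (tokens.length : Int) 1).foldl (pvStepA tokens) (false, [])).2

-- ===== PORT B =====
def merge_negative_tokens_alt (tokens : List String) : List String :=
  match tokens with
  | [] => []
  | tok :: rest =>
    if tok ∈ pvNegations then
      match rest with
      | [] => [tok]
      | nxt :: rest' => (tok ++ "_" ++ nxt) :: merge_negative_tokens_alt rest'
    else tok :: merge_negative_tokens_alt rest

-- ===== PRECONDITION & SPEC =====
def Spec_merge_negative_tokens (tokens : List String) (out : List String) : Prop := out = merge_negative_tokens_alt tokens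
instance (tokens : List String) (out : List String) : Decidable (Spec_merge_negative_tokens tokens out) := by unfold Spec_merge_negative_tokens; infer_instance

-- ===== CLAIM (what is proved, stated in full; the proofs are below) =====
def Claim_equal_merge_negative_tokens : Prop := ∀ (tokens : List String), Dom_merge_negative_tokens tokens → Spec_merge_negative_tokens tokens (merge_negative_tokens tokens)

-- ===== LEMMAS AND PROOFS =====

theorem pvStepA_true (tokens : List String) (acc : List String) (i : Int) :
    pvStepA tokens (true, acc) i = (false, acc) := by simp [pvStepA]

theorem pvStepA_pos (tokens : List String) (acc : List String) (i : Int)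
    (h : PySem.List.pyGetD tokens i "" ∈ pvNegations ∧ i + 1 < (tokens.length : Int)) :
    pvStepA tokens (false, acc) i =
      (true, acc ++ [PySem.List.pyGetD tokens i "" ++ "_" ++ PySem.List.pyGetD tokens (i + 1) ""]) := by
  simp [pvStepA, h]

theorem pvStepA_neg (tokens : List String) (acc : List String) (i : Int)
    (h : ¬ (PySem.List.pyGetD tokens i "" ∈ pvNegations ∧ i + 1 < (tokens.length : Int))) :
    pvStepA tokens (false, acc) i = (false, acc ++ [PySem.List.pyGetD tokens i ""]) := by
  simp only [pvStepA, if_neg h]; rfl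

theorem pvGetD_append (pre suf : List String) (k : Nat) :
    PySem.List.pyGetD (pre ++ suf) ((pre.length : Int) + k) "" = suf.getD k "" := by
  have : ((pre.length : Int) + k) = ((pre.length + k : Nat) : Int) := by push_cast; ring
  rw [this, PySem.List.pyGetD_natCast]
  simp [List.getD, List.getElem?_append_right]

theorem pvLoopA_eq (suf : List String) : ∀ (pre acc : List String),
    ((PySem.List.pyRange (pre.length : Int) (((pre ++ suf).length : Nat) : Int) 1).foldl
        (pvStepA (pre ++ suf)) (false, acc)).2
      = acc ++ merge_negative_tokens_alt suf := by
  induction suf using merge_negative_tokens_alt.induct with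
  | case1 => intro pre acc; simp [PySem.List.pyRange_one_eq_nil, merge_negative_tokens_alt]
  | case2 tok hneg =>
    intro pre acc
    rw [PySem.List.pyRange_one_cons (by simp)]
    have h0 : PySem.List.pyGetD (pre ++ [tok]) ((pre.length : Int)) "" = tok := by
      simp
    simp only [List.foldl_cons]
    rw [pvStepA_neg _ _ _ (by rw [h0]; simp)]
    rw [h0]
    simp [PySem.List.pyRange_one_eq_nil, merge_negative_tokens_alt, hneg]
  | case3 tok hneg nxt rest' ih =>
    intro pre acc
    rw [PySem.List.pyRange_one_cons (by simp; omega)]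
    have h0 : PySem.List.pyGetD (pre ++ tok :: nxt :: rest') ((pre.length : Int)) "" = tok := by
      simp
    have h1 : PySem.List.pyGetD (pre ++ tok :: nxt :: rest') ((pre.length : Int) + 1) "" = nxt := by
      simpa using pvGetD_append pre (tok :: nxt :: rest') 1
    simp only [List.foldl_cons]
    rw [pvStepA_pos _ _ _ (by rw [h0]; exact ⟨hneg, by simp⟩)]
    rw [h0, h1]
    rw [PySem.List.pyRange_one_cons (by simp)]
    simp only [List.foldl_cons, pvStepA_true]
    have hre : pre ++ tok :: nxt :: rest' = (pre ++ [tok, nxt]) ++ rest' := by simp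
    have hlen : (pre.length : Int) + 1 + 1 = ((pre ++ [tok, nxt]).length : Int) := by
      simp; ring
    rw [hre, hlen, ih (pre ++ [tok, nxt]) (acc ++ [tok ++ "_" ++ nxt])]
    simp [merge_negative_tokens_alt, hneg]
  | case4 tok rest hneg ih =>
    intro pre acc
    rw [PySem.List.pyRange_one_cons (by simp)]
    have h0 : PySem.List.pyGetD (pre ++ tok :: rest) ((pre.length : Int)) "" = tok := by
      simp
    simp only [List.foldl_cons]
    rw [pvStepA_neg _ _ _ (by rw [h0]; simp [hneg])]
    rw [h0]
    have hre : pre ++ tok :: rest = (pre ++ [tok]) ++ rest := by simp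
    have hlen : (pre.length : Int) + 1 = ((pre ++ [tok]).length : Int) := by simp
    rw [hre, hlen, ih (pre ++ [tok]) (acc ++ [tok])]
    have halt : merge_negative_tokens_alt (tok :: rest) = tok :: merge_negative_tokens_alt rest := by
      unfold merge_negative_tokens_alt; rw [if_neg hneg, ← merge_negative_tokens_alt.eq_def]
    rw [halt]; simp

-- ===== VERDICT (by name: the statement is the Claim_ definition above) =====
theorem merge_negative_tokens_spec : Claim_equal_merge_negative_tokens := by
  intro tokens _
  unfold Spec_merge_negative_tokens merge_negative_tokens
  have := pvLoopA_eq tokens [] []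
  simpa using this
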